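-- pv_equiv track=rewrite | github.com/hlachaizeDS/Normalization_Pump_OT2 | smallFunctions.py | inter_columns
-- ===== SOURCE A (Python) =====
-- def inter_columns(list_of_list_of_columns):
--     '''Returns a list containing all the columns appearing at least in one of the column lists, in numeric order'''
--     cols=[]
--     for col in range(12):
--         for column_list in list_of_list_of_columns:
--             if col+1 in column_list:
--                 cols.append(col+1)
--                 break
--     return cols
-- ===== SOURCE B (Python) =====
-- def inter_columns(list_of_list_of_columns):
--     '''Returns a list containing all the columns appearing at least in one of the column lists, in numeric order'''
--     present = set()
--     for sub in list_of_list_of_columns: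
--         present.update(sub)
--     return [c for c in range(1, 13) if c in present]
-- ===== Notes on version B (the rewrite author's own statement) =====
-- stated objective: simpler
-- what changed: B builds one union set of all sublists in a single pass and then filters the fixed range 1..12 against it, instead of scanning every sublist (with an inner break) separately for each of the 12 columns.
import Mathlib
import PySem

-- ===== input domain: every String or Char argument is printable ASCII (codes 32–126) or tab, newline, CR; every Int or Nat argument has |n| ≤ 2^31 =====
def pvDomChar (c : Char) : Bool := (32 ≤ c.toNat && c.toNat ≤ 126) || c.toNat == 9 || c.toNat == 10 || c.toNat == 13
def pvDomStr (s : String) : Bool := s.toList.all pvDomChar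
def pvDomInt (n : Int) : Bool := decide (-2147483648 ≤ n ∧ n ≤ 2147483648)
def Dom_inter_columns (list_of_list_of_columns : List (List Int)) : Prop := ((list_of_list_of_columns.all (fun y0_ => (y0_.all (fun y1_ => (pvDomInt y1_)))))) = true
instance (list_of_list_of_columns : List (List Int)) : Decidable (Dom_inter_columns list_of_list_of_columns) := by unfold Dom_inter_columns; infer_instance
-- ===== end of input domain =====

-- B builds one union set of all sublists, then filters the fixed range 1..12 against it (objective: simpler).

-- ===== PORT A =====
-- inner 'for column_list in …: if col+1 in column_list: append; break' — true iff some sublist contains the value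
def interAnySub (c : Int) : List (List Int) → Bool
  | [] => false
  | cl :: rest => if cl.contains c then true else interAnySub c rest

def inter_columns (list_of_list_of_columns : List (List Int)) : List Int :=
  (PySem.List.pyRange 0 12 1).foldl
    (fun cols col => if interAnySub (col + 1) list_of_list_of_columns then cols ++ [col + 1] else cols)
    []

-- ===== PORT B =====
def inter_columns_alt (list_of_list_of_columns : List (List Int)) : List Int :=
  let present : PySem.Set Int :=
    list_of_list_of_columns.foldl (fun s sub => PySem.Set.update s sub) PySem.Set.empty
  (PySem.List.pyRange 1 13 1).filter (fun c => PySem.Set.contains present c)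

-- ===== PRECONDITION & SPEC =====
def Spec_inter_columns (list_of_list_of_columns : List (List Int)) (out : List Int) : Prop := out = inter_columns_alt list_of_list_of_columns
instance (list_of_list_of_columns : List (List Int)) (out : List Int) : Decidable (Spec_inter_columns list_of_list_of_columns out) := by unfold Spec_inter_columns; infer_instance

-- ===== CLAIM (what is proved, stated in full; the proofs are below) =====
def Claim_equal_inter_columns : Prop := ∀ (list_of_list_of_columns : List (List Int)), Dom_inter_columns list_of_list_of_columns → Spec_inter_columns list_of_list_of_columns (inter_columns list_of_list_of_columns)

-- ===== LEMMAS AND PROOFS =====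

theorem interAnySub_eq_any (c : Int) (l : List (List Int)) :
    interAnySub c l = l.any (fun cl => cl.contains c) := by
  induction l with
  | nil => rfl
  | cons cl rest ih => cases h : cl.contains c <;> simp [interAnySub, h, ih]

theorem mem_foldl_update (l : List (List Int)) (s : PySem.Set Int) (c : Int) :
    (c ∈ l.foldl (fun s sub => PySem.Set.update s sub) s) ↔ (c ∈ s ∨ ∃ sub ∈ l, c ∈ sub) := by
  induction l generalizing s with
  | nil => simp
  | cons sub rest ih =>
      simp only [List.foldl_cons, ih, PySem.Set.mem_update, List.mem_cons]
      constructor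
      · rintro (⟨h | h⟩ | ⟨a, ha, hc⟩) <;>
          [exact Or.inl h; exact Or.inr ⟨sub, Or.inl rfl, h⟩; exact Or.inr ⟨a, Or.inr ha, hc⟩]
      · rintro (h | ⟨a, (rfl | ha), hc⟩) <;>
          [exact Or.inl (Or.inl h); exact Or.inl (Or.inr hc); exact Or.inr ⟨a, ha, hc⟩]

-- ===== VERDICT (by name: the statement is the Claim_ definition above) =====
theorem inter_columns_spec : Claim_equal_inter_columns := by
  intro l _
  show inter_columns l = inter_columns_alt l
  unfold inter_columns inter_columns_alt
  rw [PySem.List.foldl_append_if (p := fun col => interAnySub (col + 1) l) (f := fun col => col + 1)]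
  have hr : (PySem.List.pyRange 0 12 1).map (fun col => col + 1) = PySem.List.pyRange 1 13 1 := by decide
  rw [List.nil_append, ← hr, List.filter_map]
  congr 1
  apply List.filter_congr
  intro col _
  rw [interAnySub_eq_any, Bool.eq_iff_iff]
  simp [Function.comp, mem_foldl_update, List.any_eq_true]
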